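-- pv_equiv track=rewrite | github.com/3-Braincellss/braincells-shell | test/test_cut.py | my_cut
-- ===== SOURCE A (Python) =====
-- def my_cut(lines, intervals):
--     out = []
--     for line in lines:
--         str = ""
--         for pos, char in enumerate(line):
--             if pos + 1 in intervals:
--                 str += char
--         out.append(str.rstrip())
--     return out
-- ===== SOURCE B (Python) =====
-- def my_cut(lines, intervals):
--     positions = sorted(set(intervals))
--     out = []
--     for line in lines:
--         n = len(line)
--         picked = "".join(line[p - 1] for p in positions if 1 <= p <= n)
--         out.append(picked.rstrip())
--     return out
-- ===== Notes on version B (the rewrite author's own statement) =====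
-- stated objective: faster
-- what changed: B precomputes sorted(set(intervals)) once and, per line, indexes directly at those positions instead of scanning every character and testing membership in intervals.
import Mathlib
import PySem

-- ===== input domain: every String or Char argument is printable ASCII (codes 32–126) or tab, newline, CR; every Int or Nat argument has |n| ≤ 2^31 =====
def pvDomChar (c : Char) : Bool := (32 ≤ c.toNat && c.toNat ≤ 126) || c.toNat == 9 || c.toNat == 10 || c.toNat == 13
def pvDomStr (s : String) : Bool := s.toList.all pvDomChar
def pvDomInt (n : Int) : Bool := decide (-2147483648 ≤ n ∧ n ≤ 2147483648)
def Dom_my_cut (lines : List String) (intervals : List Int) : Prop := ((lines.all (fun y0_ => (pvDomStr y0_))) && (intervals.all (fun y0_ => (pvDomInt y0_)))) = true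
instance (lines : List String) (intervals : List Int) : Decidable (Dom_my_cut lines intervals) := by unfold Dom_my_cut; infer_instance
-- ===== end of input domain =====

-- B precomputes sorted(set(intervals)) once and indexes each line directly at those positions, instead of scanning every character and testing membership (objective: faster).

-- ===== PORT A =====
-- inner loop: for pos, char in enumerate(line): if pos + 1 in intervals: str += char
def myCutLineA (intervals : List Int) (line : String) : String :=
  let s := (PySem.List.enumerate line.toList 0).foldl
    (fun str pc => if pc.1 + 1 ∈ intervals then str ++ [pc.2] else str) []
  String.mk (PySem.Chars.rstrip s)

def my_cut (lines : List String) (intervals : List Int) : List String :=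
  lines.foldl (fun out line => out ++ [myCutLineA intervals line]) []

-- ===== PORT B =====
-- ''.join(line[p-1] for p in positions if 1 <= p <= n), then rstrip
def myCutLineB (positions : List Int) (line : String) : String :=
  let cs := line.toList
  let n : Int := cs.length
  let picked := positions.filterMap
    (fun p => if 1 ≤ p ∧ p ≤ n then PySem.List.pyGet? cs (p - 1) else none)
  String.mk (PySem.Chars.rstrip picked)

def my_cut_alt (lines : List String) (intervals : List Int) : List String :=
  let positions := PySem.List.sorted (PySem.Set.ofList intervals) (fun x => x) false
  lines.map (fun line => myCutLineB positions line)

-- ===== PRECONDITION & SPEC =====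
def Spec_my_cut (lines : List String) (intervals : List Int) (out : List String) : Prop := out = my_cut_alt lines intervals
instance (lines : List String) (intervals : List Int) (out : List String) : Decidable (Spec_my_cut lines intervals out) := by unfold Spec_my_cut; infer_instance

-- ===== CLAIM (what is proved, stated in full; the proofs are below) =====
def Claim_equal_my_cut : Prop := ∀ (lines : List String) (intervals : List Int), Dom_my_cut lines intervals → Spec_my_cut lines intervals (my_cut lines intervals)

-- ===== LEMMAS AND PROOFS =====

-- two strictly increasing lists with the same members are equal
theorem eq_of_pairwise_lt_of_mem_iff {l₁ l₂ : List Int}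
    (h₁ : l₁.Pairwise (· < ·)) (h₂ : l₂.Pairwise (· < ·))
    (hm : ∀ x, x ∈ l₁ ↔ x ∈ l₂) : l₁ = l₂ := by
  induction l₁ generalizing l₂ with
  | nil =>
    cases l₂ with
    | nil => rfl
    | cons b t => exact absurd ((hm b).2 (List.mem_cons_self)) (by simp)
  | cons a t ih =>
    cases l₂ with
    | nil => exact absurd ((hm a).1 (List.mem_cons_self)) (by simp)
    | cons b u =>
      have hab : a = b := by
        have ha := (hm a).1 (List.mem_cons_self)
        have hb := (hm b).2 (List.mem_cons_self)
        rcases List.mem_cons.1 ha with h | h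
        · exact h
        · rcases List.mem_cons.1 hb with h' | h'
          · exact h'.symm
          · have := (List.pairwise_cons.1 h₂).1 a h
            have := (List.pairwise_cons.1 h₁).1 b h'
            omega
      subst hab
      have ht := (List.pairwise_cons.1 h₁).2
      have hu := (List.pairwise_cons.1 h₂).2
      have hat : ∀ x ∈ t, a < x := (List.pairwise_cons.1 h₁).1
      have hau : ∀ x ∈ u, a < x := (List.pairwise_cons.1 h₂).1
      have hmem : ∀ x, x ∈ t ↔ x ∈ u := by
        intro x
        constructor
        · intro hx
          have hx' := (hm x).1 (List.mem_cons_of_mem _ hx)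
          have hax := hat x hx
          rcases List.mem_cons.1 hx' with h | h
          · omega
          · exact h
        · intro hx
          have hx' := (hm x).2 (List.mem_cons_of_mem _ hx)
          have hax := hau x hx
          rcases List.mem_cons.1 hx' with h | h
          · omega
          · exact h
      exact congrArg (a :: ·) (ih ht hu hmem)

theorem filterMap_eq_map_of_mem {α β : Type} {l : List α} {f : α → Option β} {g : α → β}
    (h : ∀ x ∈ l, f x = some (g x)) : l.filterMap f = l.map g := by
  induction l with
  | nil => rfl
  | cons a t ih =>
    simp only [List.filterMap_cons, h a List.mem_cons_self, List.map_cons]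
    exact congrArg _ (ih fun x hx => h x (List.mem_cons_of_mem _ hx))

theorem filterMap_ite {α β : Type} (c : α → Prop) [DecidablePred c] (f : α → Option β) (l : List α) :
    l.filterMap (fun p => if c p then f p else none)
      = (l.filter (fun p => decide (c p))).filterMap f := by
  induction l with
  | nil => rfl
  | cons a t ih =>
    simp only [List.filterMap_cons, List.filter_cons]
    by_cases h : c a
    · simp only [h, if_pos, decide_true, List.filterMap_cons, ih]
    · simp only [h, decide_false, ih]
      simp

-- the per-line strings agree
theorem line_eq (intervals : List Int) (line : String) :
    myCutLineA intervals line
      = myCutLineB (PySem.List.sorted (PySem.Set.ofList intervals) (fun x => x) false) line := by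
  unfold myCutLineA myCutLineB
  dsimp only
  set cs := line.toList with hcs
  set ps := PySem.List.sorted (PySem.Set.ofList intervals) (fun x => x) false with hps
  set n : Int := (cs.length : Int) with hn
  -- A's accumulated chars
  have hA : (PySem.List.enumerate cs 0).foldl
      (fun str pc => if pc.1 + 1 ∈ intervals then str ++ [pc.2] else str) ([] : List Char)
      = ((PySem.List.enumerate cs 0).filter (fun pc => decide (pc.1 + 1 ∈ intervals))).map (·.2) := by
    rw [show (fun (str : List Char) (pc : Int × Char) => if pc.1 + 1 ∈ intervals then str ++ [pc.2] else str)
          = (fun str pc => if decide (pc.1 + 1 ∈ intervals) = true then str ++ [(·.2) pc] else str) by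
        funext str pc; simp]
    exact PySem.List.foldl_append_if _ _ _ _
  rw [hA]
  congr 1
  -- B's filterMap: restrict to the in-range positions
  have hB : ps.filterMap (fun p => if 1 ≤ p ∧ p ≤ n then PySem.List.pyGet? cs (p - 1) else none)
      = (ps.filter (fun p => decide (1 ≤ p ∧ p ≤ n))).filterMap (fun p => PySem.List.pyGet? cs (p - 1)) :=
    filterMap_ite _ _ ps
  rw [hB]
  -- the filtered positions are exactly the selected indices + 1
  set E := (PySem.List.enumerate cs 0).filter (fun pc => decide (pc.1 + 1 ∈ intervals)) with hE
  have hq : ps.filter (fun p => decide (1 ≤ p ∧ p ≤ n)) = E.map (fun pc => pc.1 + 1) := by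
    apply eq_of_pairwise_lt_of_mem_iff
    · exact List.Pairwise.filter _ (PySem.List.sorted_ofList_pairwise_lt intervals)
    · have : E.Pairwise (fun p q => p.1 < q.1) :=
        List.Pairwise.filter _ (PySem.List.pairwise_lt_enumerate cs 0)
      exact (List.pairwise_map).2 (this.imp (by intro a b h; omega))
    · intro x
      simp only [List.mem_filter, PySem.List.mem_sorted, PySem.Set.mem_ofList, hE,
        List.mem_map, decide_eq_true_eq, hps]
      constructor
      · rintro ⟨hx, h1, h2⟩
        have hn' : n = (cs.length : Int) := hn
        refine ⟨(x - 1, cs[(x - 1).toNat]!), ⟨?_, ?_⟩, by omega⟩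
        · rw [PySem.List.mem_enumerate_iff]
          refine ⟨(x - 1).toNat, by omega, ?_⟩
          have hgb : cs[(x - 1).toNat]! = cs[(x - 1).toNat]'(by omega) := getElem!_pos cs _ (by omega)
          simp only [Prod.ext_iff, hgb]
          exact ⟨by omega, trivial⟩
        · show (x - 1) + 1 ∈ intervals
          rwa [show x - 1 + 1 = x by omega]
      · rintro ⟨pc, ⟨hpe, hpi⟩, hx⟩
        rw [PySem.List.mem_enumerate_iff] at hpe
        obtain ⟨k, hk, hpck⟩ := hpe
        subst hpck
        simp only [] at hpi hx
        have hn' : n = (cs.length : Int) := hn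
        exact ⟨hx ▸ hpi, by omega, by omega⟩
  rw [hq, List.filterMap_map]
  congr 1
  symm
  apply filterMap_eq_map_of_mem
  intro pc hpc
  rw [hE, List.mem_filter, PySem.List.mem_enumerate_iff] at hpc
  obtain ⟨⟨k, hk, hpck⟩, _⟩ := hpc
  subst hpck
  simp only [Function.comp_apply]
  have : ((0 : Int) + k + 1 - 1) = (k : Int) := by omega
  rw [this, PySem.List.pyGet?_natCast]
  simp [hk]

theorem foldl_append_map {α β : Type} (l : List α) (f : α → β) (acc : List β) :
    l.foldl (fun out x => out ++ [f x]) acc = acc ++ l.map f := by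
  induction l generalizing acc with
  | nil => simp
  | cons a t ih => simp [List.foldl_cons, ih, List.append_assoc]

-- ===== VERDICT (by name: the statement is the Claim_ definition above) =====
theorem my_cut_spec : Claim_equal_my_cut := by
  intro lines intervals _
  unfold Spec_my_cut my_cut my_cut_alt
  rw [foldl_append_map]
  simp only [List.nil_append]
  exact List.map_congr_left fun line _ => line_eq intervals line
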